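-- pv_equiv track=rewrite | github.com/GodfreyHardy/PythonProject | dk59.py | f
-- ===== SOURCE A (Python) =====
-- def f(n,m):
--     if n==1:
--         return 1
--     k = pow(2,n-1)
--     if m+1>k//2:
--         return 1-f(n,m-(k//2))
--     else:
--         return 1-f(n-1,m)
--     return 1
-- ===== SOURCE B (Python) =====
-- def f(n, m):
--     # One iterative pass over the levels n, n-1, ..., 2: at each level divmod
--     # batches all the repeated subtractions A performs one recursive call at a
--     # time; the answer is 1 minus the parity of the total number of steps.
--     total = 0
--     while n > 1:
--         h = 1 << (n - 2)
--         if m >= h: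
--             q, m = divmod(m, h)
--             total += q
--         total += 1
--         n -= 1
--     return 1 - (total & 1)
-- ===== Notes on version B (the rewrite author's own statement) =====
-- stated objective: faster
-- what changed: Replaces A's one-subtraction-per-recursive-call descent with a single iterative loop over the n levels that batches all subtractions at a level with one divmod and returns 1 minus the parity of the total step count; faster because A's call count grows with m/2^(n-2) while B's loop count is n; a timing run measured B >= 25x at the largest size both finished, and A timed out where B returned on larger probes.
-- outside the precondition, e.g. on f(2, 9990): A returns 0, B returns 0; on f(9990, 0): A returns 0, B returns 0
import Mathlib
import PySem

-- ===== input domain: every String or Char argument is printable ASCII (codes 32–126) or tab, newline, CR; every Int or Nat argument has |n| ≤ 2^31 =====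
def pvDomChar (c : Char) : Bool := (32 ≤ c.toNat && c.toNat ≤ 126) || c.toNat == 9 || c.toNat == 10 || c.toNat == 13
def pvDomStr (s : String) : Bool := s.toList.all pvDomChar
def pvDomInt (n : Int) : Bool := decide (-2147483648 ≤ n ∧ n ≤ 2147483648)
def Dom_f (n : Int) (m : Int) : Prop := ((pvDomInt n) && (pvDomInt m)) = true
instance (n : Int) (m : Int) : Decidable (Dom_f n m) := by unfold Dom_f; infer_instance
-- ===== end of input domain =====

-- B replaces A's one-subtraction-per-recursive-call descent with a single iterative loop over
-- the levels that batches each level's subtractions with one divmod and returns 1 minus the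
-- parity of the total step count.

-- ===== PORT A =====

-- used by f's decreasing_by: for n ≥ 2, Python's k // 2 equals 2^(n-2)
theorem pvHalfK (n : Int) (h2 : 2 ≤ n) :
    PySem.Int.floordiv (2 ^ (n - 1).toNat) 2 = 2 ^ (n - 2).toNat := by
  rw [PySem.Int.floordiv_eq_ediv_of_pos (by norm_num)]
  have h : (n - 1).toNat = (n - 2).toNat + 1 := by omega
  rw [h, pow_succ]
  exact Int.mul_ediv_cancel _ (by norm_num)

theorem pvPowPos (n : Int) : (0 : Int) < 2 ^ (n - 2).toNat := by positivity

def f (n : Int) (m : Int) : Int :=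
  if n = 1 then 1
  else if n < 1 then 0  -- totality guard only: Python recurses forever here (outside Pre_f)
  else
    let k : Int := 2 ^ (n - 1).toNat        -- pow(2, n-1)
    if m + 1 > PySem.Int.floordiv k 2 then
      1 - f n (m - PySem.Int.floordiv k 2)
    else
      1 - f (n - 1) m
termination_by (n.toNat, m.toNat)
decreasing_by
  · apply Prod.Lex.right
    rename_i h1 h2 h3
    rw [pvHalfK n (by omega)] at h3 ⊢
    have := pvPowPos n
    omega
  · apply Prod.Lex.left
    omega

-- ===== PORT B =====

def fAltGo (n : Int) (m : Int) (total : Int) : Int :=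
  if n > 1 then
    let h : Int := 2 ^ (n - 2).toNat        -- 1 << (n - 2)
    if m ≥ h then
      fAltGo (n - 1) (PySem.Int.mod m h) (total + PySem.Int.floordiv m h + 1)
    else
      fAltGo (n - 1) m (total + 1)
  else
    1 - PySem.Int.band total 1
termination_by n.toNat
decreasing_by
  · rename_i h _; omega
  · rename_i h _; omega

def f_alt (n : Int) (m : Int) : Int := fAltGo n m 0

-- ===== PRECONDITION & SPEC =====
-- Pre_f excludes exactly the inputs on which the Python A raises RecursionError: n ≤ 0
-- (unbounded descent) and calls whose recursion depth n + m // 2^(n-2) + popcount(m mod 2^(n-2))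
-- exceeds the 10000-frame recursion limit A runs under (A's deepest returning call sits at
-- depth ≈ 9996; the 9980 threshold leaves only the ~16-frame sliver of uncertainty from the
-- interpreter's own stack frames — see the cited examples in that sliver).
def Pre_f (n : Int) (m : Int) : Prop :=
  1 ≤ n ∧ (n = 1 ∨
    n + (if 0 ≤ m then
           PySem.Int.floordiv m (2 ^ (n - 2).toNat)
             + (PySem.Int.bitCount (PySem.Int.mod m (2 ^ (n - 2).toNat)) : Int)
         else 0) ≤ 9980)
instance (n : Int) (m : Int) : Decidable (Pre_f n m) := by unfold Pre_f; infer_instance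

def pvWitness_f : Int × Int := (3, 5)

def Spec_f (n : Int) (m : Int) (out : Int) : Prop := out = f_alt n m
instance (n : Int) (m : Int) (out : Int) : Decidable (Spec_f n m out) := by unfold Spec_f; infer_instance

-- ===== CLAIM (what is proved, stated in full; the proofs are below) =====
def Claim_equal_f : Prop := ∀ (n : Int) (m : Int), Dom_f n m → Pre_f n m → Spec_f n m (f n m)

-- ===== LEMMAS AND PROOFS =====

theorem f_one (m : Int) : f 1 m = 1 := by rw [f]; simp

theorem f_step_m (n m : Int) (h2 : 2 ≤ n) (hm : 2 ^ (n - 2).toNat ≤ m) :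
    f n m = 1 - f n (m - 2 ^ (n - 2).toNat) := by
  have hn1 : ¬ n = 1 := by omega
  have hn0 : ¬ n < 1 := by omega
  rw [f]
  simp only [hn1, hn0, if_false, pvHalfK n h2,
    show m + 1 > (2 : Int) ^ (n - 2).toNat from by omega, if_true]

theorem f_step_n (n m : Int) (h2 : 2 ≤ n) (hm : m < 2 ^ (n - 2).toNat) :
    f n m = 1 - f (n - 1) m := by
  have hn1 : ¬ n = 1 := by omega
  have hn0 : ¬ n < 1 := by omega
  rw [f]
  simp only [hn1, hn0, if_false, pvHalfK n h2,
    show ¬ (m + 1 > (2 : Int) ^ (n - 2).toNat) from by omega]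

-- A's repeated subtractions at level n collapse to a quotient/remainder with a parity flip
theorem f_reduce (n : Int) (h2 : 2 ≤ n) (m : Int) (hm0 : 0 ≤ m) :
    f n m = if (m / 2 ^ (n - 2).toNat) % 2 = 0
            then f n (m % 2 ^ (n - 2).toNat)
            else 1 - f n (m % 2 ^ (n - 2).toNat) := by
  have hpos := pvPowPos n
  set h : Int := 2 ^ (n - 2).toNat with hh
  have main : ∀ K : Nat, ∀ m : Int, 0 ≤ m → m.toNat ≤ K →
      f n m = if (m / h) % 2 = 0 then f n (m % h) else 1 - f n (m % h) := by
    intro K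
    induction K with
    | zero =>
      intro m hm0 hK
      have hm : m = 0 := by omega
      subst hm
      simp
    | succ K ih =>
      intro m hm0 hK
      by_cases hlt : m < h
      · rw [Int.ediv_eq_zero_of_lt hm0 hlt, Int.emod_eq_of_lt hm0 hlt]
        simp
      · have hstep := f_step_m n m h2 (by omega)
        have ih' := ih (m - h) (by omega) (by omega)
        have hdiv : (m - h) / h = m / h - 1 := by
          have := Int.add_mul_ediv_right m (-1) (ne_of_gt hpos)
          simpa [sub_eq_add_neg, neg_one_mul] using this
        have hmod : (m - h) % h = m % h := Int.sub_emod_right m h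
        have hq1 : 1 ≤ m / h := by
          rw [Int.le_ediv_iff_mul_le hpos]; omega
        rw [hstep, ih', hdiv, hmod]
        by_cases hp : (m / h) % 2 = 0
        · have hne : ¬ ((m / h - 1) % 2 = 0) := by omega
          rw [if_pos hp, if_neg hne]
          ring
        · have he : (m / h - 1) % 2 = 0 := by omega
          rw [if_neg hp, if_pos he]
  exact main m.toNat m hm0 le_rfl

-- the loop of B computes A's value flipped by the parity of the accumulator
theorem go_eq (N : Nat) : ∀ n m total : Int, n.toNat ≤ N → 1 ≤ n → 0 ≤ total →
    fAltGo n m total = if total % 2 = 0 then f n m else 1 - f n m := by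
  induction N with
  | zero => intro n m total hN h1 ht; omega
  | succ N ih =>
    intro n m total hN h1 ht
    by_cases hn1 : n = 1
    · subst hn1
      rw [fAltGo, f_one]
      have hb : PySem.Int.band total 1 = total % 2 := by
        rw [PySem.Int.band_one, PySem.Int.mod_eq_emod_of_pos (by norm_num)]
      simp only [show ¬ ((1 : Int) > 1) from by omega, if_false, hb]
      by_cases hp : total % 2 = 0
      · simp [hp]
      · have : total % 2 = 1 := by omega
        simp [this]
    · have h2 : 2 ≤ n := by omega
      have hpos := pvPowPos n
      set h : Int := 2 ^ (n - 2).toNat with hh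
      rw [fAltGo]
      simp only [show n > 1 from by omega, if_true]
      have hfd : PySem.Int.floordiv m h = m / h := PySem.Int.floordiv_eq_ediv_of_pos hpos
      have hmd : PySem.Int.mod m h = m % h := PySem.Int.mod_eq_emod_of_pos hpos
      by_cases hm : m ≥ h
      · have hq0 : 0 ≤ m / h := Int.ediv_nonneg (by omega) (by omega)
        have ih' := ih (n - 1) (m % h) (total + m / h + 1) (by omega) (by omega) (by omega)
        rw [if_pos hm, hfd, hmd, ih']
        have hr := f_reduce n h2 m (by omega)
        rw [← hh] at hr
        have hmodlt : m % h < h := Int.emod_lt_of_pos m hpos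
        have hinner := f_step_n n (m % h) h2 (by omega)
        rw [hinner] at hr
        rw [hr]
        set x := f (n - 1) (m % h) with hx
        by_cases hp : total % 2 = 0 <;> by_cases hq : (m / h) % 2 = 0 <;>
          · have : ((total + m / h + 1) % 2 = 0) ∨ ¬ ((total + m / h + 1) % 2 = 0) := em _
            split_ifs <;> omega
      · have ih' := ih (n - 1) m (total + 1) (by omega) (by omega) (by omega)
        rw [if_neg hm, ih']
        have hstep := f_step_n n m h2 (by omega)
        rw [hstep]
        set x := f (n - 1) m with hx
        by_cases hp : total % 2 = 0 <;>
          · split_ifs <;> omega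

-- ===== VERDICT (by name: the statement is the Claim_ definition above) =====
theorem f_spec : Claim_equal_f := by
  intro n m _ hpre
  unfold Spec_f f_alt
  rw [go_eq n.toNat n m 0 le_rfl hpre.1 le_rfl]
  simp
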